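-- pv_equiv track=rewrite | github.com/sseongsukim/CodingTest | programmers/level2/46.py | solution
-- ===== SOURCE A (Python) =====
-- def solution(order):
--     extra_container = []
--     b_index = 0
--     o_index = 0
--     for i in range(1, len(order) + 1):
--         extra_container.append(i)
--         while extra_container and extra_container[-1] == order[o_index]:
--             extra_container.pop()
--             o_index += 1
--             b_index += 1
--     return o_index
-- ===== SOURCE B (Python) =====
-- def solution(order):
--     n = len(order)
--     stack = []
--     nxt = 1          # next box number waiting in the warehouse
--     count = 0
--     for x in order:
--         m = min(x, n)
--         if nxt <= m:
--             stack.extend(range(nxt, m + 1))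
--             nxt = m + 1
--         if stack and stack[-1] == x:
--             stack.pop()
--             count += 1
--         else:
--             break
--     return count
-- ===== Notes on version B (the rewrite author's own statement) =====
-- stated objective: alternative
-- what changed: B iterates over the target sequence itself, lazily pushing boxes up to each target in one range-extend and stopping at the first mismatch, instead of A's eager loop over box numbers with an inner cascade-pop while-loop.
import Mathlib
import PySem

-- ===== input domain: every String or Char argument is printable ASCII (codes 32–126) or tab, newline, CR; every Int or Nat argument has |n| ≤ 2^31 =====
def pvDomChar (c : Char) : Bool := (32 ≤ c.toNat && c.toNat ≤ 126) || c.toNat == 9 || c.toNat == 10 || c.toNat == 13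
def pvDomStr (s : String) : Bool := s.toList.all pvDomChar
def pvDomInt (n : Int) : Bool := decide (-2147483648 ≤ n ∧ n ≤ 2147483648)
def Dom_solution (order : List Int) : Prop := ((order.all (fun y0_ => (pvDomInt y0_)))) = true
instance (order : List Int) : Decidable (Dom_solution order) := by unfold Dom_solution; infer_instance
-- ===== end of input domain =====

-- B re-derives the same count by iterating over the target sequence with lazy range pushes
-- and an early break, instead of A's loop over box numbers with an inner cascade-pop;
-- objective: alternative (same O(n) cost, different decomposition).


-- ===== PORT A =====
-- inner while loop: pops while the stack is nonempty and its top equals order[o_index].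
-- order[o_index] with o_index out of range would raise in Python, but that state is
-- unreachable (stack nonempty forces o_index < len(order)); the 'none' branch is exact dead code.
def popA (order : List Int) (st : List Int) (o : Int) : List Int × Int :=
  match st with
  | [] => ([], o)
  | v :: rest =>
    match PySem.List.pyGet? order o with
    | some t => if v = t then popA order rest (o + 1) else (v :: rest, o)
    | none => (v :: rest, o)

-- for i in range(1, len(order)+1): append i; then the while loop.  Stack head = Python's stack[-1].
def runA (order : List Int) (ps : List Int) (st : List Int) (o : Int) : Int :=
  match ps with
  | [] => o
  | i :: is =>
    let p := popA order (i :: st) o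
    runA order is p.1 p.2

def solution (order : List Int) : Int :=
  runA order (PySem.List.pyRange 1 ((order.length : Int) + 1) 1) [] 0

-- ===== PORT B =====
-- for x in order: m = min(x, n); lazily push boxes nxt..m (range-extend), then pop on a
-- match or break.  Stack head = Python's stack[-1], so extend(range(nxt, m+1)) prepends
-- the reversed range.
def runB (n : Int) (ts : List Int) (st : List Int) (nxt : Int) (c : Int) : Int :=
  match ts with
  | [] => c
  | x :: xs =>
    let m := min x n
    let p := if nxt ≤ m then (((PySem.List.pyRange nxt (m + 1) 1).reverse) ++ st, m + 1) else (st, nxt)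
    match p.1 with
    | y :: rest => if y = x then runB n xs rest p.2 (c + 1) else c
    | [] => c

def solution_alt (order : List Int) : Int :=
  runB (order.length : Int) order [] 1 0

-- ===== PRECONDITION & SPEC =====
def Spec_solution (order : List Int) (out : Int) : Prop := out = solution_alt order
instance (order : List Int) (out : Int) : Decidable (Spec_solution order out) := by unfold Spec_solution; infer_instance

-- ===== CLAIM (what is proved, stated in full; the proofs are below) =====
def Claim_equal_solution : Prop := ∀ (order : List Int), Dom_solution order → Spec_solution order (solution order)

-- ===== LEMMAS AND PROOFS =====

-- once o_index has left the index range (o = n), the pop loop can never fire again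
lemma popA_none (order st : List Int) (o : Int)
    (h : PySem.List.pyGet? order o = none) : popA order st o = (st, o) := by
  cases st with
  | nil => simp [popA]
  | cons v rest => simp [popA, h]

lemma runA_none (order ps st : List Int) (o : Int)
    (h : PySem.List.pyGet? order o = none) : runA order ps st o = o := by
  induction ps generalizing st with
  | nil => simp [runA]
  | cons i is ih => simp [runA, popA_none order (i :: st) o h, ih]

lemma pyGet?_lt (order : List Int) (o : Int) (h0 : 0 ≤ o) (h1 : o < (order.length : Int)) :
    PySem.List.pyGet? order o = some (order.getD o.toNat 0) ∧
      order.drop o.toNat = order.getD o.toNat 0 :: order.drop (o + 1).toNat := by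
  have hlt : o.toNat < order.length := by omega
  constructor
  · rw [PySem.List.pyGet?_of_nonneg order h0]
    simp [List.getElem?_eq_getElem hlt]
  · have : (o + 1).toNat = o.toNat + 1 := by omega
    rw [this, List.getD_eq_getElem _ _ hlt]
    exact (List.getElem_cons_drop hlt).symm

-- terminal state o = len(order): A can never pop again and B has no targets left
lemma main_terminal (order st : List Int) (nxt o : Int)
    (h3 : 0 ≤ o) (hoe : (order.length : Int) ≤ o) :
    runA order (PySem.List.pyRange nxt ((order.length : Int) + 1) 1)
        (popA order st o).1 (popA order st o).2
      = runB (order.length : Int) (order.drop o.toNat) st nxt o := by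
  have hnone : PySem.List.pyGet? order o = none := by
    rw [PySem.List.pyGet?_of_nonneg order h3]
    apply List.getElem?_eq_none
    omega
  rw [popA_none order st o hnone, runA_none order _ st o hnone]
  have hd : order.drop o.toNat = [] := by
    apply List.drop_eq_nil_of_le
    omega
  rw [hd]
  simp [runB]

-- main simulation lemma: from any state (st, nxt, o) whose stack elements all lie below nxt,
-- A (finish the current pop cascade, then keep pushing nxt..n) and B (process the remaining
-- targets) compute the same final count.
lemma main (order : List Int) (k : Nat) :
    ∀ (st : List Int) (nxt o : Int),
      (∀ y ∈ st, y < nxt) → 1 ≤ nxt → nxt ≤ (order.length : Int) + 1 →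
      0 ≤ o → o ≤ (order.length : Int) →
      (((order.length : Int) - o).toNat * (order.length + 2) +
        (((order.length : Int) + 1 - nxt).toNat) ≤ k) →
      runA order (PySem.List.pyRange nxt ((order.length : Int) + 1) 1)
          (popA order st o).1 (popA order st o).2
        = runB (order.length : Int) (order.drop o.toNat) st nxt o := by
  induction k with
  | zero =>
    intro st nxt o _ h1 h2 h3 h4 hk
    have h5 : (((order.length : Int) - o).toNat) * (order.length + 2) = 0 := by omega
    have h6 : ((order.length : Int) - o).toNat = 0 := by
      rcases Nat.mul_eq_zero.mp h5 with h | h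
      · exact h
      · omega
    have hoe : o = (order.length : Int) := by omega
    exact main_terminal order st nxt o h3 (by omega)
  | succ k ih =>
    intro st nxt o hst h1 h2 h3 h4 hk
    set n : Int := (order.length : Int) with hn
    by_cases ho : o < n
    · obtain ⟨hget, hdrop⟩ := pyGet?_lt order o h3 ho
      set t : Int := order.getD o.toNat 0 with ht
      -- does the cascade fire?
      by_cases hq : ∃ rest, st = t :: rest
      · obtain ⟨rest, hrest⟩ := hq
        have htlt : t < nxt := hst t (by rw [hrest]; exact List.mem_cons_self)
        have hpop : popA order st o = popA order rest (o + 1) := by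
          rw [hrest]; simp [popA, hget]
        rw [hpop]
        have hmul : ((n - (o + 1)).toNat) * (order.length + 2) + (order.length + 2)
            = ((n - o).toNat) * (order.length + 2) := by
          have hh : (n - o).toNat = (n - (o + 1)).toNat + 1 := by omega
          rw [hh, Nat.succ_mul]
        have hih := ih rest nxt (o + 1) (fun y hy => hst y (by rw [hrest]; exact List.mem_cons_of_mem _ hy))
          h1 h2 (by omega) (by omega) (by omega)
        rw [hih, hdrop]
        have hnpush : ¬ nxt ≤ min t n := by omega
        simp only [runB, hrest, hnpush, if_false]
        simp
      · -- quiescent: st is empty or its top differs from t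
        have hpop : popA order st o = (st, o) := by
          cases st with
          | nil => simp [popA]
          | cons v rest =>
            have hvt : v ≠ t := fun h => hq ⟨rest, by rw [h]⟩
            simp [popA, hget, hvt]
        rw [hpop]
        by_cases hnx : nxt ≤ n
        · -- a push remains: push nxt, apply IH at (nxt :: st, nxt+1, o),
          -- then show B absorbs the single push into its batch
          rw [PySem.List.pyRange_one_cons (by omega)]
          have hih := ih (nxt :: st) (nxt + 1) o
            (by intro y hy; rcases List.mem_cons.mp hy with h | h
                · omega
                · exact lt_trans (hst y h) (by omega))
            (by omega) (by omega) h3 h4 (by omega)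
          simp only [runA]
          rw [hih]
          -- absorption: runB (drop o) (nxt :: st) (nxt+1) o = runB (drop o) st nxt o
          rw [hdrop]
          by_cases hp : nxt ≤ min t n
          · -- B pushes in both states and the resulting states coincide
            have hstack : ((PySem.List.pyRange nxt (min t n + 1) 1).reverse ++ st : List Int)
                = (PySem.List.pyRange (nxt + 1) (min t n + 1) 1).reverse ++ (nxt :: st) := by
              rw [PySem.List.pyRange_one_cons (by omega)]
              simp
            by_cases hp1 : nxt + 1 ≤ min t n
            · simp only [runB, hp, hp1, if_pos]
              rw [hstack]
            · have hm : min t n = nxt := by omega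
              have hrange : (PySem.List.pyRange nxt (min t n + 1) 1).reverse = [nxt] := by
                rw [hm, PySem.List.pyRange_one_cons (by omega),
                  PySem.List.pyRange_one_eq_nil (by omega)]
                simp
              simp only [runB, hp, hp1, if_pos, if_false, hrange]
              rw [hm]
              simp
          · -- no push in either state; t < nxt, so the fresh top nxt ≠ t: both break
            have htn : t < nxt := by omega
            have hne : nxt ≠ t := by omega
            cases st with
            | nil =>
              have hp1 : ¬ nxt + 1 ≤ min t n := by omega
              simp [runB, hp, hp1, hne]
            | cons y rest =>
              have hyt : y ≠ t := fun h => hq ⟨rest, by rw [h]⟩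
              have hp1 : ¬ nxt + 1 ≤ min t n := by omega
              simp [runB, hp, hp1, hne, hyt]
        · -- nxt = n + 1 : no pushes remain; B also breaks immediately
          have hnx1 : nxt = n + 1 := by omega
          rw [hnx1, PySem.List.pyRange_one_eq_nil (by omega)]
          simp only [runA]
          rw [hdrop]
          have hp : ¬ n + 1 ≤ min t n := by omega
          cases st with
          | nil => simp [runB, hp]
          | cons y rest =>
            have hyt : y ≠ t := fun h => hq ⟨rest, by rw [h]⟩
            simp [runB, hp, hyt]
    · -- o = n : no targets remain; A can never pop again and returns o
      have hoe : o = n := by omega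
      exact main_terminal order st nxt o h3 (by omega)

-- ===== VERDICT (by name: the statement is the Claim_ definition above) =====
theorem solution_spec : Claim_equal_solution := by
  intro order _
  unfold Spec_solution solution solution_alt
  have h := main order
    (((order.length : Int) - 0).toNat * (order.length + 2) +
      (((order.length : Int) + 1 - 1).toNat))
    [] 1 0 (by simp) (by omega) (by omega) (by omega) (by omega) (by omega)
  simpa [popA] using h
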